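-- pv_equiv track=rewrite | github.com/zooniverse/aggregation | engine/automatic_optics.py | create_clusters
-- ===== SOURCE A (Python) =====
-- def create_clusters(ordering,maxima):
--     if maxima == []:
--         return [ordering,]
--
--     next_maxima = max(maxima,key=lambda x:x[1])
--
--     split = next_maxima[0]
--     left_split = ordering[:split]
--     right_split = ordering[split:]
--
--     maxima_index = maxima.index(next_maxima)
--     left_maximia = maxima[:maxima_index]
--     right_maximia = maxima[maxima_index+1:]
--     # print right_maximia
--     # need to adjust the indices for the right hand values
--     right_maximia = [(i-split,j) for (i,j) in right_maximia]
--     # print right_maximia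
--
--     retval = create_clusters(left_split,left_maximia)
--     retval.extend(create_clusters(right_split,right_maximia))
--
--     return retval
-- ===== SOURCE B (Python) =====
-- def create_clusters(ordering, maxima):
--     # Iterative depth-first traversal with an explicit stack instead of recursion,
--     # finding the heaviest maximum and its position in a single scan.
--     out = []
--     stack = [(ordering, maxima)]
--     while stack:
--         seg, mx = stack.pop()
--         if not mx:
--             out.append(seg)
--             continue
--         k = 0
--         for t in range(1, len(mx)):
--             if mx[t][1] > mx[k][1]:
--                 k = t
--         split = mx[k][0]
--         right_mx = [(i - split, j) for i, j in mx[k + 1:]]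
--         stack.append((seg[split:], right_mx))
--         stack.append((seg[:split], mx[:k]))
--     return out
-- ===== Notes on version B (the rewrite author's own statement) =====
-- stated objective: alternative
-- what changed: B replaces A's recursion and its separate max()+list.index() passes with an iterative depth-first loop over an explicit stack that finds the heaviest maximum and its position in one scan; same output on every input.
import Mathlib
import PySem

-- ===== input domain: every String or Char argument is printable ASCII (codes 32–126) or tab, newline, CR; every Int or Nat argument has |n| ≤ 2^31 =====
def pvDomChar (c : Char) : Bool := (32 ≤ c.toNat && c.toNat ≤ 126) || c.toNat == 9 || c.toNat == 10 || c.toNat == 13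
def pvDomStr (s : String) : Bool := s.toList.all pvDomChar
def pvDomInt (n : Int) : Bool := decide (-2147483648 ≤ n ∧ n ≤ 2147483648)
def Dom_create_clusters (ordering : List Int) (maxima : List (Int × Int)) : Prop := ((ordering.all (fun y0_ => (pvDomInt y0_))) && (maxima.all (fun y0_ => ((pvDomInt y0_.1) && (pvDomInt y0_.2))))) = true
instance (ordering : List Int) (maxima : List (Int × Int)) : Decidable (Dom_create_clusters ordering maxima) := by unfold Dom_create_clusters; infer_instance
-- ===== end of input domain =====

-- B replaces A's recursion and its separate max()+index() passes with an explicit-stack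
-- depth-first loop and a single argmax scan; equal output on every input is proved below.

-- ===== PORT A =====
-- Literal port of A: pick max(maxima, key=snd) (first maximal), split ordering and
-- maxima there (Python slice semantics), shift right-hand maxima, recurse on both halves.
def create_clusters (ordering : List Int) (maxima : List (Int × Int)) : List (List Int) :=
  if maxima = [] then [ordering]
  else
    match hm : PySem.List.max? maxima (fun x => x.2) with
    | none => []  -- unreachable: maxima ≠ [] (max?_eq_none_iff)
    | some next_maxima =>
      let split := next_maxima.1
      let left_split := PySem.List.slice ordering none (some split)
      let right_split := PySem.List.slice ordering (some split) none
      match hi : PySem.List.index? maxima next_maxima with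
      | none => []  -- unreachable: next_maxima ∈ maxima (max?_mem)
      | some maxima_index =>
        let left_maximia := PySem.List.slice maxima none (some (maxima_index : Int))
        let right_maximia :=
          (PySem.List.slice maxima (some ((maxima_index : Int) + 1)) none).map
            (fun p => (p.1 - split, p.2))
        create_clusters left_split left_maximia ++
          create_clusters right_split right_maximia
termination_by maxima.length
decreasing_by
  · have hk : maxima_index < maxima.length := by
      have := PySem.List.index?_eq_idxOf? (xs := maxima) (v := next_maxima)
      rw [this] at hi
      exact List.idxOf?_eq_some_iff.mp hi |>.1
    rw [PySem.List.slice_to_natCast]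
    simp only [List.length_take]
    omega
  · have hk : maxima_index < maxima.length := by
      have := PySem.List.index?_eq_idxOf? (xs := maxima) (v := next_maxima)
      rw [this] at hi
      exact List.idxOf?_eq_some_iff.mp hi |>.1
    have : ((maxima_index : Int) + 1) = ((maxima_index + 1 : Nat) : Int) := by push_cast; ring
    rw [this, PySem.List.slice_from_natCast]
    simp only [List.length_map, List.length_drop]
    omega

-- ===== PORT B =====
-- B-side helper: Source B's single argmax scan (running index k, running best over range(1,len)).
def argmaxLoop : List (Int × Int) → Nat → Int → Nat → Nat
  | [], _, _, k => k
  | q :: rest, t, best, k =>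
    if best < q.2 then argmaxLoop rest (t + 1) q.2 t
    else argmaxLoop rest (t + 1) best k

-- result of the scan stays below t + |s| (or is the incoming k): needed for termination of ccLoop
theorem argmaxLoop_lt (s : List (Int × Int)) : ∀ (t k : Nat) (best : Int) (N : Nat),
    k < N → t + s.length ≤ N → argmaxLoop s t best k < N := by
  induction s with
  | nil => intro t k best N hk _; simpa [argmaxLoop] using hk
  | cons q rest ih =>
    intro t k best N hk hN
    simp only [argmaxLoop, List.length_cons] at *
    split
    · exact ih (t + 1) t q.2 N (by omega) (by omega)
    · exact ih (t + 1) k best N hk (by omega)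

-- Source B's while-loop over the explicit stack (head = top of stack; Python pushes the right
-- half then the left half, so the left half is popped first — here it is the new head).
-- mx[:k] and mx[k+1:] are ported as take/drop since 0 ≤ k < len mx.
def ccLoop : List (List Int × List (Int × Int)) → List (List Int) → List (List Int)
  | [], out => out
  | (seg, []) :: rest, out => ccLoop rest (out ++ [seg])
  | (seg, q :: ms) :: rest, out =>
    -- k = single argmax scan; split = mx[k][0]; push (right half) then (left half):
    -- the left half is the new top of the stack (popped first).
    ccLoop
      ((PySem.List.slice seg none (some (((q :: ms).getD (argmaxLoop (q :: ms) 0 q.2 0) (0, 0)).1)),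
          (q :: ms).take (argmaxLoop (q :: ms) 0 q.2 0)) ::
        (PySem.List.slice seg (some (((q :: ms).getD (argmaxLoop (q :: ms) 0 q.2 0) (0, 0)).1)) none,
          ((q :: ms).drop (argmaxLoop (q :: ms) 0 q.2 0 + 1)).map
            (fun p => (p.1 - ((q :: ms).getD (argmaxLoop (q :: ms) 0 q.2 0) (0, 0)).1, p.2))) :: rest)
      out
termination_by stk _ => (stk.map (fun p => 2 * p.2.length + 1)).sum
decreasing_by
  · simp only [List.map_cons, List.sum_cons]
    omega
  · have : argmaxLoop (q :: ms) 0 q.2 0 < (q :: ms).length :=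
      argmaxLoop_lt (q :: ms) 0 0 q.2 (q :: ms).length (by simp) (by simp)
    simp only [List.map_cons, List.sum_cons, List.length_take, List.length_map,
      List.length_drop, List.length_cons] at *
    omega

def create_clusters_alt (ordering : List Int) (maxima : List (Int × Int)) : List (List Int) :=
  ccLoop [(ordering, maxima)] []

-- ===== PRECONDITION & SPEC =====
def Spec_create_clusters (ordering : List Int) (maxima : List (Int × Int)) (out : List (List Int)) : Prop := out = create_clusters_alt ordering maxima
instance (ordering : List Int) (maxima : List (Int × Int)) (out : List (List Int)) : Decidable (Spec_create_clusters ordering maxima out) := by unfold Spec_create_clusters; infer_instance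

-- ===== CLAIM (what is proved, stated in full; the proofs are below) =====
def Claim_equal_create_clusters : Prop := ∀ (ordering : List Int) (maxima : List (Int × Int)), Dom_create_clusters ordering maxima → Spec_create_clusters ordering maxima (create_clusters ordering maxima)

-- ===== LEMMAS AND PROOFS =====

-- basic fact about a drop that is a cons
theorem drop_cons_facts {α : Type} (l : List α) (t : Nat) (q : α) (s : List α)
    (h : l.drop t = q :: s) :
    t < l.length ∧ l[t]? = some q ∧ l.drop (t + 1) = s := by
  have hlen : l.length - t = s.length + 1 := by
    have := congrArg List.length h; simpa using this
  have ht : t < l.length := by omega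
  have hget : l[t]? = some q := by
    have h0 : (l.drop t)[0]? = l[t + 0]? := @List.getElem?_drop _ l t 0
    rw [h] at h0; simpa using h0.symm
  have hdrop : l.drop (t + 1) = s := by
    have : (l.drop t).drop 1 = l.drop (t + 1) := by rw [List.drop_drop]
    rw [← this, h]; rfl
  exact ⟨ht, hget, hdrop⟩

-- invariant of the argmax scan: the result is in range and every earlier element is strictly smaller
theorem argmaxLoop_inv (full : List (Int × Int)) :
    ∀ (s : List (Int × Int)) (t k : Nat), full.drop t = s → k < full.length →
    (∀ j, j < k → (full.getD j (0, 0)).2 < (full.getD k (0, 0)).2) →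
    (∀ j, j < t → (full.getD j (0, 0)).2 ≤ (full.getD k (0, 0)).2) →
    argmaxLoop s t (full.getD k (0, 0)).2 k < full.length ∧
      (∀ j, j < argmaxLoop s t (full.getD k (0, 0)).2 k →
        (full.getD j (0, 0)).2 < (full.getD (argmaxLoop s t (full.getD k (0, 0)).2 k) (0, 0)).2) := by
  intro s
  induction s with
  | nil =>
    intro t k _ hk h2 _
    exact ⟨hk, h2⟩
  | cons q rest ih =>
    intro t k hs hk h2 h3
    obtain ⟨ht, hq, hdrop⟩ := drop_cons_facts full t q rest hs
    have hqD : full.getD t (0, 0) = q := by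
      simp [List.getD_eq_getElem?_getD, hq]
    simp only [argmaxLoop]
    split
    · rename_i hlt
      have hres := ih (t + 1) t hdrop ht
        (by intro j hj
            rcases Nat.lt_or_ge j k with hjk | hjk
            · exact lt_of_lt_of_le (h2 j hjk) (by rw [hqD]; exact le_of_lt hlt)
            · rcases Nat.eq_or_lt_of_le hjk with rfl | hjk'
              · rw [hqD]; exact hlt
              · exact lt_of_le_of_lt (h3 j hj) (by rw [hqD]; exact hlt))
        (by intro j hj
            rcases Nat.lt_or_ge j t with hjt | hjt
            · rcases Nat.lt_or_ge j k with hjk | hjk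
              · exact le_of_lt (lt_of_lt_of_le (h2 j hjk) (by rw [hqD]; exact le_of_lt hlt))
              · rcases Nat.eq_or_lt_of_le hjk with rfl | hjk'
                · rw [hqD]; exact le_of_lt hlt
                · exact le_of_lt (lt_of_le_of_lt (h3 j hjt) (by rw [hqD]; exact hlt))
            · have : j = t := by omega
              subst this; exact le_refl _)
      rw [hqD] at hres
      exact hres
    · rename_i hge
      exact ih (t + 1) k hdrop hk h2
        (by intro j hj
            rcases Nat.lt_or_ge j t with hjt | hjt
            · exact h3 j hjt
            · have : j = t := by omega
              subst this; rw [hqD]; omega)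

-- the foldl inside max? visits the same elements as the argmax scan and keeps the same champion
theorem max?_foldl_argmax (full : List (Int × Int)) :
    ∀ (s : List (Int × Int)) (t k : Nat), full.drop t = s → k < full.length →
    List.foldl (fun acc x => match acc with
        | none => some x
        | some m => if m.2 < x.2 then some x else some m)
      (some (full.getD k (0, 0))) s
    = some (full.getD (argmaxLoop s t (full.getD k (0, 0)).2 k) (0, 0)) := by
  intro s
  induction s with
  | nil => intro t k _ _; rfl
  | cons q rest ih =>
    intro t k hs hk
    obtain ⟨ht, hq, hdrop⟩ := drop_cons_facts full t q rest hs
    have hqD : full.getD t (0, 0) = q := by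
      simp [List.getD_eq_getElem?_getD, hq]
    simp only [List.foldl_cons, argmaxLoop]
    split
    · rename_i hlt
      rw [show q = full.getD t (0, 0) from hqD.symm]
      exact ih (t + 1) t hdrop ht
    · exact ih (t + 1) k hdrop hk

-- max? with key snd on a nonempty list returns the element found by the argmax scan
theorem max?_eq_argmax (q : Int × Int) (rest : List (Int × Int)) :
    PySem.List.max? (q :: rest) (fun x => x.2)
      = some ((q :: rest).getD (argmaxLoop (q :: rest) 0 q.2 0) (0, 0)) := by
  have h0 : (q :: rest).getD 0 (0, 0) = q := rfl
  have hstep : argmaxLoop (q :: rest) 0 q.2 0 = argmaxLoop rest 1 q.2 0 := by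
    simp [argmaxLoop]
  have := max?_foldl_argmax (q :: rest) rest 1 0 rfl (by simp)
  rw [h0] at this
  rw [hstep]
  rw [← this]
  simp only [PySem.List.max?, List.foldl_cons]
  congr 1
  funext acc x
  cases acc <;> rfl

-- first occurrence: if everything before position r has a strictly smaller key, index? finds r
theorem index?_of_strict (xs : List (Int × Int)) (r : Nat) (hr : r < xs.length)
    (h : ∀ j, j < r → (xs.getD j (0, 0)).2 < (xs.getD r (0, 0)).2) :
    PySem.List.index? xs (xs.getD r (0, 0)) = some r := by
  rw [PySem.List.index?_eq_idxOf?]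
  rw [List.idxOf?_eq_some_iff]
  refine ⟨hr, ?_, ?_⟩
  · exact (List.getD_eq_getElem xs (0,0) hr).symm
  · intro j hj
    have hj' : j < xs.length := lt_trans hj hr
    have hgr : xs.getD r (0, 0) = xs[r] := List.getD_eq_getElem xs (0, 0) hr
    have h1 := h j hj
    rw [List.getD_eq_getElem xs (0, 0) hj', hgr] at h1
    intro hEq
    rw [hgr] at hEq
    rw [hEq] at h1
    exact lt_irrefl _ h1

-- unfolding A in the nonempty case, given the values of max? and index?
theorem create_clusters_cons (ordering : List Int) (mx : List (Int × Int))
    (nm : Int × Int) (mi : Nat) (hne : mx ≠ [])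
    (hm : PySem.List.max? mx (fun x => x.2) = some nm)
    (hi : PySem.List.index? mx nm = some mi) :
    create_clusters ordering mx =
      create_clusters (PySem.List.slice ordering none (some nm.1))
        (PySem.List.slice mx none (some (mi : Int))) ++
      create_clusters (PySem.List.slice ordering (some nm.1) none)
        ((PySem.List.slice mx (some ((mi : Int) + 1)) none).map (fun p => (p.1 - nm.1, p.2))) := by
  rw [create_clusters]
  rw [if_neg hne]
  split
  · rename_i heq; rw [hm] at heq; exact absurd heq (by simp)
  · rename_i nm' heq
    rw [hm] at heq
    injection heq with heq; subst heq
    split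
    · rename_i heq2; rw [hi] at heq2; exact absurd heq2 (by simp)
    · rename_i mi' heq2
      rw [hi] at heq2
      injection heq2 with heq2; subst heq2
      rfl

-- main invariant: the stack loop flushes the stack as A would, appending to out
theorem ccLoop_eq : ∀ (N : Nat) (stk : List (List Int × List (Int × Int))),
    (stk.map (fun p => 2 * p.2.length + 1)).sum ≤ N →
    ∀ (out : List (List Int)),
    ccLoop stk out = out ++ (stk.map (fun p => create_clusters p.1 p.2)).flatten := by
  intro N
  induction N with
  | zero =>
    intro stk hs out
    cases stk with
    | nil => simp [ccLoop]
    | cons p rest => simp at hs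
  | succ N ih =>
    intro stk hs out
    match stk with
    | [] => simp [ccLoop]
    | (seg, []) :: rest =>
      rw [ccLoop]
      rw [ih rest (by simp at hs ⊢; omega)]
      simp only [List.map_cons, List.flatten_cons]
      rw [create_clusters]
      simp
    | (seg, q :: ms) :: rest =>
      have hinv := argmaxLoop_inv (q :: ms) (q :: ms) 0 0 (by simp) (by simp)
        (by intro j hj; omega) (by intro j hj; omega)
      rw [show (q :: ms).getD 0 (0, 0) = q from rfl] at hinv
      obtain ⟨hrlt, hstrict⟩ := hinv
      have hm : PySem.List.max? (q :: ms) (fun x => x.2)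
          = some ((q :: ms).getD (argmaxLoop (q :: ms) 0 q.2 0) (0, 0)) := max?_eq_argmax q ms
      have hi := index?_of_strict (q :: ms) _ hrlt hstrict
      rw [ccLoop]
      rw [ih _ (by
          have hk : argmaxLoop (q :: ms) 0 q.2 0 < (q :: ms).length := hrlt
          simp only [List.map_cons, List.sum_cons, List.length_take, List.length_map,
            List.length_drop, List.length_cons] at hs ⊢
          simp only [List.length_cons] at hk
          rw [Nat.min_eq_left (by omega)]
          omega)]
      simp only [List.map_cons, List.flatten_cons]
      rw [create_clusters_cons seg (q :: ms) _ _ (by simp) hm hi]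
      rw [PySem.List.slice_to_natCast]
      rw [show ((argmaxLoop (q :: ms) 0 q.2 0 : Int) + 1)
            = ((argmaxLoop (q :: ms) 0 q.2 0 + 1 : Nat) : Int) by push_cast; ring]
      rw [PySem.List.slice_from_natCast]
      rw [List.append_assoc]

-- ===== VERDICT (by name: the statement is the Claim_ definition above) =====
theorem create_clusters_spec : Claim_equal_create_clusters := by
  intro ordering maxima _
  unfold Spec_create_clusters create_clusters_alt
  rw [ccLoop_eq ((([(ordering, maxima)]).map (fun p => 2 * p.2.length + 1)).sum) _ (le_refl _)]
  simp
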